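-- pv_equiv track=rewrite | github.com/bburger11/snek | main.py | move_head
-- ===== SOURCE A (Python) =====
-- def move_head(snake, dir):
--     # Keep track of old head before moving
--     old_head = snake[0]
--     # Move up
--     if dir == 0:
--         snake[0] = (snake[0][0], snake[0][1] - 1)
--     # Move left
--     elif dir == 1:
--         snake[0] = (snake[0][0] - 1, snake[0][1])
--     # Move down
--     elif dir == 2:
--         snake[0] = (snake[0][0], snake[0][1] + 1)
--     # Move right
--     elif dir == 3:
--         snake[0] = (snake[0][0] + 1, snake[0][1])
--     # Move the remainder of the snake
--     if len(snake) > 1: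
--         for i in range(1, len(snake)):
--             temp = old_head
--             old_head = snake[i]
--             snake[i] = temp
--
--     return snake
-- ===== SOURCE B (Python) =====
-- def move_head(snake, dir):
--     # Rotation view: the snake after a move is (new head) prepended to the snake
--     # with its tail segment dropped.  Offset by closed-form arithmetic on dir.
--     if 0 <= dir <= 3:
--         dx = (dir % 2) * (dir - 2)
--         dy = ((dir + 1) % 2) * (dir - 1)
--     else:
--         dx = dy = 0
--     new_head = (snake[0][0] + dx, snake[0][1] + dy)
--     snake.pop()                 # drop the last segment
--     snake.insert(0, new_head)   # prepend the new head
--     return snake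
-- ===== Notes on version B (the rewrite author's own statement) =====
-- stated objective: alternative
-- what changed: Views the move as a rotation: drop the tail with pop() and prepend the new head with insert(0,...), the offset computed by a closed-form arithmetic formula (dx=(dir%2)*(dir-2), dy=((dir+1)%2)*(dir-1)) instead of A's branch chain and element-by-element swap loop.
import Mathlib
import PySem

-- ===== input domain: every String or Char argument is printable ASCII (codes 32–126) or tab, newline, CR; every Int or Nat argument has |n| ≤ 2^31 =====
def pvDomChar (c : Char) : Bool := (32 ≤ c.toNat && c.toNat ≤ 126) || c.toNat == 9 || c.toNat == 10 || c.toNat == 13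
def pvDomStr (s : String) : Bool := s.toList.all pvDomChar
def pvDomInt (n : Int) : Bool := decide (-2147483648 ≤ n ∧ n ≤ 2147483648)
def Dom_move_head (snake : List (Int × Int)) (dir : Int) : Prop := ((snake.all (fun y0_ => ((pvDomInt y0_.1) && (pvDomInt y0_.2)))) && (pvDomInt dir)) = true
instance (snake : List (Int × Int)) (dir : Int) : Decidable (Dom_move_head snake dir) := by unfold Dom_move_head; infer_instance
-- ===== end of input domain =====

-- B replaces A's if/elif chain and body-swap loop with a rotation (pop the tail,
-- prepend a new head computed by closed-form offset arithmetic); both mutate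
-- `snake` in place identically, equivalence is proved on the return value.


-- ===== PORT A =====
-- the `for i in range(1, len(snake))` swap loop, carrying old_head through the tail
def moveHeadLoopA (old : Int × Int) : List (Int × Int) → List (Int × Int)
  | [] => []
  | x :: xs => old :: moveHeadLoopA x xs

def move_head (snake : List (Int × Int)) (dir : Int) : List (Int × Int) :=
  match snake with
  | [] => []   -- unreachable: Python raises IndexError on snake[0]; excluded by Pre_
  | h :: t =>
    let old_head := h
    let newHead :=
      if dir == 0 then (h.1, h.2 - 1)
      else if dir == 1 then (h.1 - 1, h.2)
      else if dir == 2 then (h.1, h.2 + 1)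
      else if dir == 3 then (h.1 + 1, h.2)
      else h
    newHead :: moveHeadLoopA old_head t

-- ===== PORT B =====
def move_head_alt (snake : List (Int × Int)) (dir : Int) : List (Int × Int) :=
  match snake with
  | [] => []   -- unreachable: Python raises IndexError on snake[0]; excluded by Pre_
  | h :: t =>
    let off :=
      if 0 ≤ dir ∧ dir ≤ 3 then
        (PySem.Int.mod dir 2 * (dir - 2), PySem.Int.mod (dir + 1) 2 * (dir - 1))
      else ((0 : Int), (0 : Int))
    let newHead := (h.1 + off.1, h.2 + off.2)
    -- snake.pop(): drop the last element; snake.insert(0, new_head): prepend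
    newHead :: (h :: t).dropLast

-- ===== PRECONDITION & SPEC =====
-- Pre_ excludes the empty list, on which both Pythons raise IndexError at snake[0].
def Pre_move_head (snake : List (Int × Int)) (dir : Int) : Prop := snake ≠ []
instance (snake : List (Int × Int)) (dir : Int) : Decidable (Pre_move_head snake dir) := by unfold Pre_move_head; infer_instance
def pvWitness_move_head : (List (Int × Int)) × Int := ([(3, 4), (3, 5)], 0)

def Spec_move_head (snake : List (Int × Int)) (dir : Int) (out : List (Int × Int)) : Prop := out = move_head_alt snake dir
instance (snake : List (Int × Int)) (dir : Int) (out : List (Int × Int)) : Decidable (Spec_move_head snake dir out) := by unfold Spec_move_head; infer_instance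

-- ===== CLAIM =====
def Claim_equal_move_head : Prop := ∀ (snake : List (Int × Int)) (dir : Int), Dom_move_head snake dir → Pre_move_head snake dir → Spec_move_head snake dir (move_head snake dir)

-- ===== LEMMAS AND PROOFS =====
theorem moveHeadLoopA_eq_dropLast (xs : List (Int × Int)) : ∀ old, moveHeadLoopA old xs = (old :: xs).dropLast := by
  induction xs with
  | nil => intro old; rfl
  | cons x xs ih =>
    intro old
    show old :: moveHeadLoopA x xs = (old :: x :: xs).dropLast
    rw [ih x]; rfl

-- ===== VERDICT =====
theorem move_head_spec : Claim_equal_move_head := by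
  intro snake dir _ hpre
  unfold Spec_move_head
  match snake with
  | [] => exact absurd rfl hpre
  | h :: t =>
    simp only [move_head, move_head_alt, moveHeadLoopA_eq_dropLast]
    congr 1
    by_cases h0 : dir = 0
    · subst h0; simp [PySem.Int.mod]; omega
    by_cases h1 : dir = 1
    · subst h1; simp [PySem.Int.mod]; omega
    by_cases h2 : dir = 2
    · subst h2; simp [PySem.Int.mod]
    by_cases h3 : dir = 3
    · subst h3; simp [PySem.Int.mod]
    · have hr : ¬ (0 ≤ dir ∧ dir ≤ 3) := by
        rintro ⟨ha, hb⟩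
        interval_cases dir <;> simp_all
      simp [h0, h1, h2, h3, hr]
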